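-- pv_equiv track=rewrite | github.com/cagriozcaglar/ProgrammingExamples | Algorithms/TwoPointers/CountSubarraysWithScoreLessThanK/count_subarrays_with_score_less_than_k.py | countSubarraysPrefixSumBinarySearch
-- ===== SOURCE A (Python) =====
-- from typing import List
-- from itertools import accumulate
--
-- def countSubarraysPrefixSumBinarySearch(nums: List[int], k: int) -> int:
--     '''
--     1. Generate prefix_sum[0..n-1] array from nums[0..n-1] array
--     2. Calculate sums of substring(i, j) as prefix_sum[j] - prefix_sum[i-1]
--     3. suffix
--     '''
--     # initial = 0 adds 0 to the beginning of the prefix sum list, e,g. [1,2,3,4] => [0, 1, 3, 6, 10]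
--     prefix_sums = list(accumulate(nums, initial=0))
--     count = 0
--
--     for i in range(1, len(prefix_sums)):
--         left, right = 0, i
--         while left < right:
--             mid = (left + right + 1) // 2
--             if (prefix_sums[i] - prefix_sums[i - mid]) * mid < k:
--                 left = mid
--             else:
--                 right = mid - 1
--         count += left
--
--     return count
-- ===== SOURCE B (Python) =====
-- from typing import List
--
-- def countSubarraysPrefixSumBinarySearch(nums: List[int], k: int) -> int:
--     # Two-pointer sliding window: for each right end, shrink the window from the
--     # left while its score (sum * length) is >= k; all shorter windows ending at
--     # `right` then have score < k (nums nonnegative), so add the window length.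
--     count = 0
--     left = 0
--     window_sum = 0
--     for right in range(len(nums)):
--         window_sum += nums[right]
--         while left <= right and window_sum * (right - left + 1) >= k:
--             window_sum -= nums[left]
--             left += 1
--         count += right - left + 1
--     return count
-- ===== Notes on version B (the rewrite author's own statement) =====
-- stated objective: faster
-- what changed: Replaced the per-endpoint binary search over prefix sums with a single two-pointer sliding window that maintains the running window sum and left boundary across right endpoints.
-- outside the precondition, e.g. on countSubarraysPrefixSumBinarySearch([-1, 1], 1): A returns 1, B returns 3
import Mathlib
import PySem

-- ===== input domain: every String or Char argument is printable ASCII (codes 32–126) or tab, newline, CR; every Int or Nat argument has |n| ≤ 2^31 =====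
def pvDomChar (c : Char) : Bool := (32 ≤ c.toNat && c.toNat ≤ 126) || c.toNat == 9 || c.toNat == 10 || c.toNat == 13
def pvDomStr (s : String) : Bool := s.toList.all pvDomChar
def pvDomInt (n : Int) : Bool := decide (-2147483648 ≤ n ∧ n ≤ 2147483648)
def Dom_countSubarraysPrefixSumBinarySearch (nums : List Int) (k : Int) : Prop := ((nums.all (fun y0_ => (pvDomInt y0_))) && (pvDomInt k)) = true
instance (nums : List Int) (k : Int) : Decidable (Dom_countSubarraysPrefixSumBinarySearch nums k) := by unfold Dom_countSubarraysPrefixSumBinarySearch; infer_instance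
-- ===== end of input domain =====

-- B replaces A's per-endpoint binary search over prefix sums by a single O(n) two-pointer
-- sliding window (objective: faster; exact on lists of nonnegative numbers, see Pre_).

-- ===== PORT A =====
-- inner 'while left < right' binary-search loop of A
def pvBinSearch (P : List Int) (k i : Int) (left right : Int) : Int :=
  if h : left < right then
    let mid := PySem.Int.floordiv (left + right + 1) 2
    -- indices i and i - mid are always in range here (1 ≤ mid ≤ i < len P), so pyGetD is exact
    if (PySem.List.pyGetD P i 0 - PySem.List.pyGetD P (i - mid) 0) * mid < k then
      pvBinSearch P k i mid right
    else
      pvBinSearch P k i left (mid - 1)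
  else left
termination_by (right - left).toNat
decreasing_by
  all_goals
    have hb := PySem.Int.floordiv_two_mid_bounds (lo := left + 1) (hi := right) (by omega)
    have e : left + 1 + right = left + right + 1 := by ring
    rw [e] at hb
    omega

def countSubarraysPrefixSumBinarySearch (nums : List Int) (k : Int) : Int :=
  -- list(accumulate(nums, initial=0)) = scanl (+) 0 (hand port, exact)
  let P := nums.scanl (· + ·) 0
  (PySem.List.pyRange 1 (P.length : Int) 1).foldl
    (fun count i => count + pvBinSearch P k i 0 i) 0

-- ===== PORT B =====
-- inner 'while left <= right and window_sum * (right - left + 1) >= k' loop of B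
def pvShrink (nums : List Int) (k : Int) (right : Int) (left : Int) (ws : Int) : Int × Int :=
  if h : left ≤ right ∧ ws * (right - left + 1) ≥ k then
    -- nums[left] is always in range here (0 ≤ left ≤ right < len nums), so pyGetD is exact
    pvShrink nums k right (left + 1) (ws - PySem.List.pyGetD nums left 0)
  else (left, ws)
termination_by (right + 1 - left).toNat
decreasing_by omega

def countSubarraysPrefixSumBinarySearch_alt (nums : List Int) (k : Int) : Int :=
  ((PySem.List.pyRange 0 (nums.length : Int) 1).foldl
    (fun (st : Int × Int × Int) r =>
      let ws := st.2.2 + PySem.List.pyGetD nums r 0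
      let p := pvShrink nums k r st.2.1 ws
      (st.1 + (r - p.1 + 1), p.1, p.2)) (0, 0, 0)).1

-- ===== PRECONDITION & SPEC =====
-- Pre_ excludes lists containing a negative element, on which A still returns: there the
-- window score sum*length is not monotone in the window, so A's binary search runs on a
-- non-monotone predicate and its value is an accident of the probing order; neither that
-- value nor any other is specified for this task (the sliding-window count).
def Pre_countSubarraysPrefixSumBinarySearch (nums : List Int) (k : Int) : Prop :=
  ∀ x ∈ nums, 0 ≤ x
instance (nums : List Int) (k : Int) : Decidable (Pre_countSubarraysPrefixSumBinarySearch nums k) := by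
  unfold Pre_countSubarraysPrefixSumBinarySearch; infer_instance

def pvWitness_countSubarraysPrefixSumBinarySearch : List Int × Int := ([1, 2, 3], 7)

def Spec_countSubarraysPrefixSumBinarySearch (nums : List Int) (k : Int) (out : Int) : Prop := out = countSubarraysPrefixSumBinarySearch_alt nums k
instance (nums : List Int) (k : Int) (out : Int) : Decidable (Spec_countSubarraysPrefixSumBinarySearch nums k out) := by unfold Spec_countSubarraysPrefixSumBinarySearch; infer_instance

-- ===== CLAIM (what is proved, stated in full; the proofs are below) =====
def Claim_equal_countSubarraysPrefixSumBinarySearch : Prop := ∀ (nums : List Int) (k : Int), Dom_countSubarraysPrefixSumBinarySearch nums k → Pre_countSubarraysPrefixSumBinarySearch nums k → Spec_countSubarraysPrefixSumBinarySearch nums k (countSubarraysPrefixSumBinarySearch nums k)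

-- ===== LEMMAS AND PROOFS =====

-- prefix sum of the first j elements
def pvS (nums : List Int) (j : Nat) : Int := (nums.take j).sum

-- "the window of length m ending at position i (1-based right boundary) has score < k"
def pvPred (nums : List Int) (k : Int) (i m : Nat) : Prop :=
  (pvS nums i - pvS nums (i - m)) * (m : Int) < k

-- ℓ is the answer for right boundary i: the longest window ending there with score < k
def pvGood (nums : List Int) (k : Int) (i ℓ : Nat) : Prop :=
  ℓ ≤ i ∧ (ℓ = 0 ∨ pvPred nums k i ℓ) ∧ (ℓ = i ∨ ¬ pvPred nums k i (ℓ + 1))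

theorem pvS_succ (nums : List Int) (j : Nat) (h : j < nums.length) :
    pvS nums (j + 1) = pvS nums j + nums.getD j 0 := by
  simp only [pvS, List.take_add_one, List.sum_append, List.getD_eq_getElem?_getD,
    List.getElem?_eq_getElem h]
  simp

theorem pvS_le_succ (nums : List Int) (hpos : ∀ x ∈ nums, 0 ≤ x) (j : Nat) :
    pvS nums j ≤ pvS nums (j + 1) := by
  rcases Nat.lt_or_ge j nums.length with h | h
  · rw [pvS_succ nums j h]
    have hx : nums.getD j 0 = nums[j] := by
      rw [List.getD_eq_getElem?_getD, List.getElem?_eq_getElem h]; rfl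
    have := hpos nums[j] (List.getElem_mem h)
    omega
  · rw [pvS, pvS, List.take_of_length_le h, List.take_of_length_le (by omega)]

theorem pvS_mono (nums : List Int) (hpos : ∀ x ∈ nums, 0 ≤ x) {j j' : Nat} (h : j ≤ j') :
    pvS nums j ≤ pvS nums j' := by
  induction j', h using Nat.le_induction with
  | base => exact le_refl _
  | succ j' hj ih => exact le_trans ih (pvS_le_succ nums hpos j')

theorem pvScore_mono (nums : List Int) (hpos : ∀ x ∈ nums, 0 ≤ x) {i m m' : Nat}
    (hm : m ≤ m') :
    (pvS nums i - pvS nums (i - m)) * (m : Int) ≤ (pvS nums i - pvS nums (i - m')) * (m' : Int) := by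
  have h1 : pvS nums (i - m') ≤ pvS nums (i - m) := pvS_mono nums hpos (by omega)
  have h2 : pvS nums (i - m') ≤ pvS nums i := pvS_mono nums hpos (by omega)
  have hc : ((m : Int)) ≤ (m' : Int) := by exact_mod_cast hm
  apply mul_le_mul (by omega) hc (by positivity) (by omega)

theorem pvPred_down (nums : List Int) (k : Int) (hpos : ∀ x ∈ nums, 0 ≤ x) {i m m' : Nat}
    (hm : m ≤ m') (hp : pvPred nums k i m') : pvPred nums k i m :=
  lt_of_le_of_lt (pvScore_mono nums hpos hm) hp

theorem pvGood_unique (nums : List Int) (k : Int) (hpos : ∀ x ∈ nums, 0 ≤ x) {i ℓ1 ℓ2 : Nat}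
    (h1 : pvGood nums k i ℓ1) (h2 : pvGood nums k i ℓ2) : ℓ1 = ℓ2 := by
  have key : ∀ a b : Nat, pvGood nums k i a → pvGood nums k i b → a < b → False := by
    intro a b hga hgb hab
    unfold pvGood at hga hgb
    obtain ⟨hai, _, hau⟩ := hga
    obtain ⟨hbi, hbl, _⟩ := hgb
    have hbp : pvPred nums k i b := by
      rcases hbl with h | h
      · omega
      · exact h
    have hap : pvPred nums k i (a + 1) := pvPred_down nums k hpos (by omega) hbp
    rcases hau with h | h
    · omega
    · exact h hap
  rcases Nat.lt_trichotomy ℓ1 ℓ2 with h | h | h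
  · exact absurd (key ℓ1 ℓ2 h1 h2 h) (by simp)
  · exact h
  · exact absurd (key ℓ2 ℓ1 h2 h1 h) (by simp)

-- growing the window one step right and one step left cannot decrease the score
theorem pvPred_ext (nums : List Int) (k : Int) (hpos : ∀ x ∈ nums, 0 ≤ x) {m j : Nat}
    (hj : j ≤ m) :
    pvPred nums k (m + 1) (j + 1) → pvPred nums k m j := by
  unfold pvPred
  intro h
  apply lt_of_le_of_lt _ h
  have e : m + 1 - (j + 1) = m - j := by omega
  rw [e]
  have h1 : pvS nums (m - j) ≤ pvS nums m := pvS_mono nums hpos (by omega)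
  have h2 : pvS nums m ≤ pvS nums (m + 1) := pvS_mono nums hpos (by omega)
  have h3 : pvS nums (m - j) ≤ pvS nums (m + 1) := le_trans h1 h2
  have hc2 : ((j + 1 : Nat) : Int) = (j : Int) + 1 := by push_cast; ring
  rw [hc2]
  apply mul_le_mul (by omega) (by omega) (by positivity) (by omega)

theorem pvScanl_getElem? (l : List Int) (a : Int) (j : Nat) (h : j ≤ l.length) :
    (List.scanl (· + ·) a l)[j]? = some (a + (l.take j).sum) := by
  induction l generalizing a j with
  | nil =>
    have hj : j = 0 := by simpa using h
    subst hj
    simp [List.scanl_nil]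
  | cons x xs ih =>
    cases j with
    | zero => rw [List.scanl_cons]; simp
    | succ j =>
      have hj : j ≤ xs.length := by simpa using h
      rw [List.scanl_cons, List.getElem?_cons_succ, ih (a + x) j hj]
      simp only [List.take_succ_cons, List.sum_cons]
      congr 1
      ring

theorem pvP_getD (nums : List Int) (j : Nat) (h : j ≤ nums.length) :
    PySem.List.pyGetD (nums.scanl (· + ·) 0) (j : Int) 0 = pvS nums j := by
  rw [PySem.List.pyGetD_natCast, List.getD_eq_getElem?_getD, pvScanl_getElem? nums 0 j h]
  simp [pvS]

theorem pvBinSearch_good (nums : List Int) (k : Int) (hpos : ∀ x ∈ nums, 0 ≤ x)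
    (i : Nat) (hin : i ≤ nums.length) :
    ∀ d (l r : Int), (r - l).toNat = d → 0 ≤ l → l ≤ r → r ≤ (i : Int) →
    (l = 0 ∨ pvPred nums k i l.toNat) → (r = (i : Int) ∨ ¬ pvPred nums k i (r.toNat + 1)) →
    0 ≤ pvBinSearch (nums.scanl (· + ·) 0) k (i : Int) l r ∧
      pvBinSearch (nums.scanl (· + ·) 0) k (i : Int) l r ≤ (i : Int) ∧
      pvGood nums k i (pvBinSearch (nums.scanl (· + ·) 0) k (i : Int) l r).toNat := by
  intro d
  induction d using Nat.strong_induction_on with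
  | _ d ih =>
    intro l r hd h0 hlr hri hlow hup
    rw [pvBinSearch]
    by_cases hlt : l < r
    · rw [dif_pos hlt]
      have hb := PySem.Int.floordiv_two_mid_bounds (lo := l + 1) (hi := r) (by omega)
      have e : l + 1 + r = l + r + 1 := by ring
      rw [e] at hb
      set M := PySem.Int.floordiv (l + r + 1) 2 with hM
      have hcast : ((PySem.List.pyGetD (nums.scanl (· + ·) 0) (i : Int) 0 -
          PySem.List.pyGetD (nums.scanl (· + ·) 0) ((i : Int) - M) 0) * M < k) ↔
          pvPred nums k i M.toNat := by
        rw [show M = ((M.toNat : Nat) : Int) from by omega]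
        rw [show ((i : Int) - ((M.toNat : Nat) : Int)) = ((i - M.toNat : Nat) : Int) from by omega]
        rw [pvP_getD nums i hin, pvP_getD nums (i - M.toNat) (by omega)]
        unfold pvPred
        rfl
      by_cases hc : (PySem.List.pyGetD (nums.scanl (· + ·) 0) (i : Int) 0 -
          PySem.List.pyGetD (nums.scanl (· + ·) 0) ((i : Int) - M) 0) * M < k
      · rw [if_pos hc]
        exact ih (r - M).toNat (by omega) M r rfl (by omega) (by omega) hri
          (Or.inr (hcast.mp hc)) hup
      · rw [if_neg hc]
        have hnp : ¬ pvPred nums k i M.toNat := fun hp => hc (hcast.mpr hp)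
        have e4 : (M - 1).toNat + 1 = M.toNat := by omega
        exact ih (M - 1 - l).toNat (by omega) l (M - 1) rfl h0 (by omega) (by omega)
          hlow (Or.inr (by rw [e4]; exact hnp))
    · rw [dif_neg hlt]
      have hlr' : l = r := by omega
      refine ⟨h0, by omega, ?_⟩
      unfold pvGood
      refine ⟨by omega, ?_, ?_⟩
      · rcases hlow with h | h
        · left; omega
        · right; exact h
      · rcases hup with h | h
        · left; omega
        · right; rw [show l.toNat = r.toNat from by omega]; exact h

theorem pvShrink_good (nums : List Int) (k : Int) (hpos : ∀ x ∈ nums, 0 ≤ x)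
    (r : Nat) (hr : r < nums.length) :
    ∀ d (left ws : Int), ((r : Int) + 1 - left).toNat = d → 0 ≤ left → left ≤ (r : Int) + 1 →
    ws = pvS nums (r + 1) - pvS nums left.toNat →
    (left = 0 ∨ ¬ pvPred nums k (r + 1) (r + 1 - left.toNat + 1)) →
    0 ≤ (pvShrink nums k (r : Int) left ws).1 ∧
      (pvShrink nums k (r : Int) left ws).1 ≤ (r : Int) + 1 ∧
      (pvShrink nums k (r : Int) left ws).2 =
        pvS nums (r + 1) - pvS nums (pvShrink nums k (r : Int) left ws).1.toNat ∧
      pvGood nums k (r + 1) (r + 1 - (pvShrink nums k (r : Int) left ws).1.toNat) := by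
  intro d
  induction d using Nat.strong_induction_on with
  | _ d ih =>
    intro left ws hd h0 hle hws hup
    rw [pvShrink]
    have hscore : ws * ((r : Int) - left + 1) =
        (pvS nums (r + 1) - pvS nums ((r + 1) - (r + 1 - left.toNat))) *
          ((r + 1 - left.toNat : Nat) : Int) := by
      have e1 : (r + 1) - (r + 1 - left.toNat) = left.toNat := by omega
      have e2 : ((r + 1 - left.toNat : Nat) : Int) = (r : Int) - left + 1 := by omega
      rw [e1, e2, hws]
    by_cases hc : left ≤ (r : Int) ∧ ws * ((r : Int) - left + 1) ≥ k
    · rw [dif_pos hc]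
      have hltn : left.toNat < nums.length := by omega
      have hg := PySem.List.pyGetD_natCast nums left.toNat (0 : Int)
      rw [show ((left.toNat : Nat) : Int) = left from by omega] at hg
      have hws' : ws - PySem.List.pyGetD nums left 0 =
          pvS nums (r + 1) - pvS nums (left + 1).toNat := by
        rw [hg, hws, show (left + 1).toNat = left.toNat + 1 from by omega,
          pvS_succ nums left.toNat hltn]
        ring
      have hup' : ¬ pvPred nums k (r + 1) (r + 1 - (left + 1).toNat + 1) := by
        have e : r + 1 - (left + 1).toNat + 1 = r + 1 - left.toNat := by omega
        rw [e]
        unfold pvPred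
        rw [← hscore]
        exact not_lt.mpr hc.2
      exact ih ((r : Int) + 1 - (left + 1)).toNat (by omega) (left + 1)
        (ws - PySem.List.pyGetD nums left 0) rfl (by omega) (by omega) hws' (Or.inr hup')
    · rw [dif_neg hc]
      push_neg at hc
      by_cases hler : left ≤ (r : Int)
      · have hlt : ws * ((r : Int) - left + 1) < k := hc hler
        have hpred : pvPred nums k (r + 1) (r + 1 - left.toNat) := by
          unfold pvPred
          rw [← hscore]
          exact hlt
        refine ⟨h0, by omega, hws, ?_⟩
        unfold pvGood
        refine ⟨by omega, Or.inr hpred, ?_⟩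
        rcases hup with h | h
        · left; omega
        · right; exact h
      · have he : r + 1 - left.toNat = 0 := by omega
        refine ⟨h0, by omega, hws, ?_⟩
        unfold pvGood
        rw [he]
        refine ⟨by omega, Or.inl rfl, Or.inr ?_⟩
        rcases hup with h | h
        · omega
        · have e : r + 1 - left.toNat + 1 = 1 := by omega
          rw [e] at h
          exact h

theorem pvLoop (nums : List Int) (k : Int) (hpos : ∀ x ∈ nums, 0 ≤ x) :
    ∀ m : Nat, m ≤ nums.length →
    ∃ l w,
      ((PySem.List.pyRange 0 (m : Int) 1).foldl
        (fun (st : Int × Int × Int) r =>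
          let ws := st.2.2 + PySem.List.pyGetD nums r 0
          let p := pvShrink nums k r st.2.1 ws
          (st.1 + (r - p.1 + 1), p.1, p.2)) (0, 0, 0)) =
      ((PySem.List.pyRange 1 ((m : Int) + 1) 1).foldl
        (fun count i => count + pvBinSearch (nums.scanl (· + ·) 0) k i 0 i) 0, l, w) ∧
      0 ≤ l ∧ l ≤ (m : Int) ∧ w = pvS nums m - pvS nums l.toNat ∧
      (l = 0 ∨ ¬ pvPred nums k m (m - l.toNat + 1)) := by
  intro m
  induction m with
  | zero =>
    intro _
    refine ⟨0, 0, ?_, by omega, by omega, by simp [pvS], Or.inl rfl⟩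
    rw [PySem.List.pyRange_one_eq_nil (by omega), PySem.List.pyRange_one_eq_nil (by omega)]
    simp
  | succ m IH =>
    intro hm1
    have hmlt : m < nums.length := by omega
    obtain ⟨l, w, hB, hl0, hlm, hw, hup⟩ := IH (by omega)
    have hc1 : ((m + 1 : Nat) : Int) = (m : Int) + 1 := by push_cast; ring
    rw [hc1]
    rw [PySem.List.pyRange_one_succ_right (show (0 : Int) ≤ (m : Int) from by omega)]
    rw [show (m : Int) + 1 + 1 = ((m : Int) + 1) + 1 from by ring,
        PySem.List.pyRange_one_succ_right (show (1 : Int) ≤ (m : Int) + 1 from by omega)]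
    rw [List.foldl_append, List.foldl_append, hB]
    simp only [List.foldl_cons, List.foldl_nil]
    -- the B step at r = m
    have hws : w + PySem.List.pyGetD nums (m : Int) 0 =
        pvS nums (m + 1) - pvS nums l.toNat := by
      rw [PySem.List.pyGetD_natCast, hw, pvS_succ nums m hmlt]
      ring
    have hup' : l = 0 ∨ ¬ pvPred nums k (m + 1) (m + 1 - l.toNat + 1) := by
      by_cases hlz : l = 0
      · exact Or.inl hlz
      · right
        intro hp
        rcases hup with h | h
        · exact hlz h
        · have hl1 : 1 ≤ l.toNat := by omega
          have e : m + 1 - l.toNat + 1 = (m - l.toNat + 1) + 1 := by omega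
          rw [e] at hp
          exact h (pvPred_ext nums k hpos (by omega) hp)
    have hsh := pvShrink_good nums k hpos m hmlt ((m : Int) + 1 - l).toNat l
      (w + PySem.List.pyGetD nums (m : Int) 0) rfl hl0 (by omega) hws hup'
    obtain ⟨hs0, hs1, hsw, hsg⟩ := hsh
    -- the A step at i = m + 1
    have hbs := pvBinSearch_good nums k hpos (m + 1) hm1 (((m + 1 : Nat) : Int) - 0).toNat 0
      ((m + 1 : Nat) : Int) rfl (le_refl 0) (by omega) (by omega) (Or.inl rfl) (Or.inl rfl)
    rw [hc1] at hbs
    obtain ⟨hb0, hb1, hbg⟩ := hbs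
    set res := pvBinSearch (nums.scanl (· + ·) 0) k ((m : Int) + 1) 0 ((m : Int) + 1) with hres
    set p := pvShrink nums k (m : Int) l (w + PySem.List.pyGetD nums (m : Int) 0) with hp
    have huniq : res.toNat = m + 1 - p.1.toNat := pvGood_unique nums k hpos hbg hsg
    have hcount : (m : Int) - p.1 + 1 = res := by omega
    refine ⟨p.1, p.2, ?_, hs0, by omega, hsw, ?_⟩
    · rw [hcount]
    · have hsg' := hsg
      unfold pvGood at hsg'
      obtain ⟨_, _, hg3⟩ := hsg'
      by_cases hpz : p.1 = 0
      · exact Or.inl hpz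
      · right
        rcases hg3 with h | h
        · omega
        · have e : m + 1 - p.1.toNat + 1 = (m + 1 - p.1.toNat) + 1 := rfl
          rw [e]
          exact h

theorem pvFinal (nums : List Int) (k : Int) (hpos : ∀ x ∈ nums, 0 ≤ x) :
    countSubarraysPrefixSumBinarySearch nums k = countSubarraysPrefixSumBinarySearch_alt nums k := by
  obtain ⟨l, w, hB, _⟩ := pvLoop nums k hpos nums.length (le_refl _)
  have hA : countSubarraysPrefixSumBinarySearch nums k =
      (PySem.List.pyRange 1 (((nums.scanl (· + ·) 0).length : Nat) : Int) 1).foldl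
        (fun count i => count + pvBinSearch (nums.scanl (· + ·) 0) k i 0 i) 0 := rfl
  have hAlt : countSubarraysPrefixSumBinarySearch_alt nums k =
      ((PySem.List.pyRange 0 ((nums.length : Nat) : Int) 1).foldl
        (fun (st : Int × Int × Int) r =>
          let ws := st.2.2 + PySem.List.pyGetD nums r 0
          let p := pvShrink nums k r st.2.1 ws
          (st.1 + (r - p.1 + 1), p.1, p.2)) (0, 0, 0)).1 := rfl
  rw [hA, hAlt, hB]
  rw [List.length_scanl]
  rw [show ((nums.length + 1 : Nat) : Int) = ((nums.length : Nat) : Int) + 1 from by push_cast; ring]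


-- ===== VERDICT (by name: the statement is the Claim_ definition above) =====
theorem countSubarraysPrefixSumBinarySearch_spec : Claim_equal_countSubarraysPrefixSumBinarySearch := by
  intro nums k _ hpre
  unfold Spec_countSubarraysPrefixSumBinarySearch
  exact pvFinal nums k hpre
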